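-- pv_equiv track=rewrite | github.com/Will-Denton/QuadSieve | wills_testing.py | quadratic_residue
-- ===== SOURCE A (Python) =====
-- def quadratic_residue(n, p):
--     # check if n is a quadratic residue mod p (n has a square root mod p)
--     # https://en.wikipedia.org/wiki/Quadratic_residue
--     assert isinstance(n, int) and isinstance(p, int)
--     if p == 2:
--         return 1
--
--     n = n % p
--     r = (p-1) // 2
--
--     a = 1
--     while r != 0:
--         if r % 2 == 0:
--             r = r // 2
--             n = n*n % p
--         else:
--             r = r - 1
--             a = a*n % p
--     return a
-- ===== SOURCE B (Python) =====
-- def quadratic_residue(n, p):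
--     # check if n is a quadratic residue mod p (Euler's criterion), via
--     # recursive exponentiation-by-squaring instead of A's accumulator loop
--     assert isinstance(n, int) and isinstance(p, int)
--     if p == 2:
--         return 1
--
--     def power(b, e):
--         if e == 0:
--             return 1
--         if e % 2 == 0:
--             return power(b * b % p, e // 2)
--         return b * power(b, e - 1) % p
--
--     return power(n % p, (p - 1) // 2)
-- ===== Notes on version B (the rewrite author's own statement) =====
-- stated objective: alternative
-- what changed: Replaced A's iterative accumulator while-loop with a top-down recursive exponentiation-by-squaring helper (no accumulator; the product is formed on the way back up); Pre_ excludes p <= 0, where A raises ZeroDivisionError (p=0) or loops forever (p<0).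
import Mathlib
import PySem

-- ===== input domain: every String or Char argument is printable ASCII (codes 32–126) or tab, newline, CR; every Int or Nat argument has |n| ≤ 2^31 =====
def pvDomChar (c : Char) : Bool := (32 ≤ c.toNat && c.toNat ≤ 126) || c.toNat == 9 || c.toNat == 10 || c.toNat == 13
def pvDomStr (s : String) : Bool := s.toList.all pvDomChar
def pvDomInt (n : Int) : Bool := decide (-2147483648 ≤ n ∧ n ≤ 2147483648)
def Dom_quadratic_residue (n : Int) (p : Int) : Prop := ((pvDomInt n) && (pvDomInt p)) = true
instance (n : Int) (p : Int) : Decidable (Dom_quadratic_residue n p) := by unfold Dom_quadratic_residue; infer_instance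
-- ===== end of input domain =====

-- ===== PORT A =====
-- A's while-loop over (r, n, a); r = (p-1)//2 is ≥ 0 on Pre_ (p ≥ 1), so the loop
-- counter is carried as a Nat (for p ≤ 0 the Python raises or diverges — excluded by Pre_).
def pvALoop (p : Int) (r : Nat) (n a : Int) : Int :=
  if r = 0 then a
  else if r % 2 = 0 then pvALoop p (r / 2) (PySem.Int.mod (n * n) p) a
  else pvALoop p (r - 1) n (PySem.Int.mod (a * n) p)
decreasing_by all_goals omega

def quadratic_residue (n : Int) (p : Int) : Int :=
  if p = 2 then 1
  else pvALoop p (PySem.Int.floordiv (p - 1) 2).toNat (PySem.Int.mod n p) 1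

-- ===== PORT B =====
-- B's recursive power(b, e); the exponent e = (p-1)//2 is ≥ 0 on Pre_, carried as a Nat.
def pvPower (p : Int) (b : Int) (e : Nat) : Int :=
  if e = 0 then 1
  else if e % 2 = 0 then pvPower p (PySem.Int.mod (b * b) p) (e / 2)
  else PySem.Int.mod (b * pvPower p b (e - 1)) p
decreasing_by all_goals omega

def quadratic_residue_alt (n : Int) (p : Int) : Int :=
  if p = 2 then 1
  else pvPower p (PySem.Int.mod n p) (PySem.Int.floordiv (p - 1) 2).toNat

-- ===== PRECONDITION & SPEC =====
-- Pre_ excludes p ≤ 0: there Python A raises ZeroDivisionError (p = 0) or its loop never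
-- terminates (p < 0), so A returns no value.
def Pre_quadratic_residue (n : Int) (p : Int) : Prop := 1 ≤ p
instance (n : Int) (p : Int) : Decidable (Pre_quadratic_residue n p) := by unfold Pre_quadratic_residue; infer_instance
def pvWitness_quadratic_residue : Int × Int := (10, 13)

def Spec_quadratic_residue (n : Int) (p : Int) (out : Int) : Prop := out = quadratic_residue_alt n p
instance (n : Int) (p : Int) (out : Int) : Decidable (Spec_quadratic_residue n p out) := by unfold Spec_quadratic_residue; infer_instance

-- ===== CLAIM (what is proved, stated in full; the proofs are below) =====
def Claim_equal_quadratic_residue : Prop := ∀ (n : Int) (p : Int), Dom_quadratic_residue n p → Pre_quadratic_residue n p → Spec_quadratic_residue n p (quadratic_residue n p)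

-- ===== LEMMAS AND PROOFS =====

-- pushing % p through a power
theorem pvPowMod (a b : Int) (n : Nat) : (a % b) ^ n % b = a ^ n % b :=
  Int.ModEq.pow n (Int.emod_emod_of_dvd a dvd_rfl)

-- characterisation of A's loop: it computes (a * n^r) % p
theorem pvALoop_eq (p : Int) (hp : 0 < p) :
    ∀ r : Nat, ∀ n a : Int, r ≠ 0 → pvALoop p r n a = (a * n ^ r) % p := by
  intro r
  induction r using Nat.strong_induction_on with
  | _ r ih =>
    intro n a hr
    rw [pvALoop]
    simp only [hr, if_false]
    by_cases h2 : r % 2 = 0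
    · have hhalf : r / 2 ≠ 0 := by omega
      rw [if_pos h2, ih (r / 2) (by omega) _ _ hhalf,
          PySem.Int.mod_eq_emod_of_pos hp]
      have hr2 : r = 2 * (r / 2) := by omega
      conv_rhs => rw [hr2]
      rw [pow_mul, Int.mul_emod a, pvPowMod, ← Int.mul_emod, sq]
    · rw [if_neg h2, PySem.Int.mod_eq_emod_of_pos hp]
      by_cases h1 : r - 1 = 0
      · rw [pvALoop, if_pos h1]
        have : r = 1 := by omega
        subst this; ring_nf
      · rw [ih (r - 1) (by omega) _ _ h1]
        have hr1 : r = (r - 1) + 1 := by omega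
        conv_rhs => rw [hr1]
        rw [pow_succ, Int.mul_emod, Int.emod_emod_of_dvd _ dvd_rfl, ← Int.mul_emod]
        ring_nf

-- characterisation of B's power: it computes b^e % p
theorem pvPower_eq (p : Int) (hp : 0 < p) :
    ∀ e : Nat, ∀ b : Int, e ≠ 0 → pvPower p b e = b ^ e % p := by
  intro e
  induction e using Nat.strong_induction_on with
  | _ e ih =>
    intro b he
    rw [pvPower]
    simp only [he, if_false]
    by_cases h2 : e % 2 = 0
    · have hhalf : e / 2 ≠ 0 := by omega
      rw [if_pos h2, ih (e / 2) (by omega) _ hhalf,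
          PySem.Int.mod_eq_emod_of_pos hp]
      have he2 : e = 2 * (e / 2) := by omega
      conv_rhs => rw [he2]
      rw [pow_mul, pvPowMod, sq]
    · rw [if_neg h2, PySem.Int.mod_eq_emod_of_pos hp]
      by_cases h1 : e - 1 = 0
      · rw [pvPower, if_pos h1]
        have : e = 1 := by omega
        subst this; ring_nf
      · rw [ih (e - 1) (by omega) _ h1]
        have he1 : e = (e - 1) + 1 := by omega
        conv_rhs => rw [he1]
        rw [pow_succ, Int.mul_emod, Int.emod_emod_of_dvd _ dvd_rfl, ← Int.mul_emod]
        ring_nf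

-- ===== VERDICT (by name: the statement is the Claim_ definition above) =====
theorem quadratic_residue_spec : Claim_equal_quadratic_residue := by
  intro n p _ hpre
  unfold Spec_quadratic_residue quadratic_residue quadratic_residue_alt
  by_cases h2 : p = 2
  · simp [h2]
  · rw [if_neg h2, if_neg h2]
    have hp : 0 < p := hpre
    set r : Nat := (PySem.Int.floordiv (p - 1) 2).toNat with hr
    by_cases hr0 : r = 0
    · rw [hr0, pvALoop, pvPower]; simp
    · rw [pvALoop_eq p hp r _ 1 hr0, pvPower_eq p hp r _ hr0, one_mul]
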